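-- pv_equiv track=rewrite | github.com/drakempham/Technical | scratch.py | maximumScore
-- ===== SOURCE A (Python) =====
-- from typing import List
--
-- def maximumScore(grid: List[List[int]]) -> int:
--     n = len(grid)
--     prefixSum = [[0] * (n+1) for _ in range(n+1)]
--
--     for col in range(n):
--         for row in range(n):
--             prefixSum[col][row + 1] = prefixSum[col][row] + grid[row][col]
--
--     def gainScore(col, prev, curr, nxt):
--         max_neighbor = max(prev, nxt)
--         if max_neighbor <= curr:
--             return 0
--         return prefixSum[col][max_neighbor] - prefixSum[col][curr]
--
--     dp = [[-1] * (n+1) for _ in range(n+1)]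
--     for h0 in range(n+1):
--         for h1 in range(n+1):
--             dp[h0][h1] = gainScore(0, 0, h0, h1)
--
--     for col in range(1, n-1):
--         new_dp = [[-1] * (n+1) for _ in range(n+1)]
--
--         for prev in range(n+1):
--             for curr in range(n+1):
--                 if dp[prev][curr] == -1:
--                     continue
--                 for nxt in range(n+1):
--                     new_dp[curr][nxt] = max(new_dp[curr][nxt], dp[prev][curr] + gainScore(col, prev, curr, nxt))
--
--         dp = new_dp
--
--     total = 0
--     for prev in range(n+1):
--         for curr in range(n+1):
--             score = dp[prev][curr] + gainScore(n-1, prev, curr, 0)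
--             total = max(total, score)
--
--     return total
-- ===== SOURCE B (Python) =====
-- from typing import List
--
-- def maximumScore(grid: List[List[int]]) -> int:
--     n = len(grid)
--     if n == 0:
--         return 0
--     # prefix sums per column: P[c][r] = sum of grid[0..r-1][c]
--     P = [[0] * (n + 1) for _ in range(n)]
--     for c in range(n):
--         for r in range(n):
--             P[c][r + 1] = P[c][r] + grid[r][c]
--
--     def g(col, curr, m):
--         return 0 if m <= curr else P[col][m] - P[col][curr]
--
--     # dp[curr][nxt], first column: prev = 0 so the taller neighbour is nxt
--     dp = [[g(0, h0, h1) for h1 in range(n + 1)] for h0 in range(n + 1)]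
--
--     for col in range(1, n - 1):
--         new_dp = []
--         for curr in range(n + 1):
--             f = [dp[p][curr] if dp[p][curr] != -1 else None for p in range(n + 1)]
--             # pre[x] = running max of the reachable f[p], p <= x
--             pre = []
--             best = None
--             for p in range(n + 1):
--                 v = f[p]
--                 if v is not None:
--                     best = v if best is None else max(best, v)
--                 pre.append(best)
--             # one backward sweep: running = max over p > nxt of f[p] + g(col, curr, p)
--             rowr = []
--             running = None
--             for nxt in range(n, -1, -1):
--                 pv = pre[nxt]
--                 e = -1 if pv is None else max(-1, pv + g(col, curr, nxt))
--                 if running is not None: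
--                     e = max(e, running)
--                 rowr.append(e)
--                 v = f[nxt]
--                 if v is not None:
--                     t = v + g(col, curr, nxt)
--                     running = t if running is None else max(running, t)
--             new_dp.append(rowr[::-1])
--         dp = new_dp
--
--     ans = 0
--     for prev in range(n + 1):
--         for curr in range(n + 1):
--             ans = max(ans, dp[prev][curr] + g(n - 1, curr, prev))
--     return ans
-- ===== Notes on version B (the rewrite author's own statement) =====
-- stated objective: faster
-- what changed: The O(n^2) inner scan over prev in each DP transition is replaced by one prefix-maximum and one backward running-maximum sweep per curr (splitting on whether max(prev,nxt) is nxt or prev), so each layer costs O(n^2) instead of O(n^3).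
import Mathlib
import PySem

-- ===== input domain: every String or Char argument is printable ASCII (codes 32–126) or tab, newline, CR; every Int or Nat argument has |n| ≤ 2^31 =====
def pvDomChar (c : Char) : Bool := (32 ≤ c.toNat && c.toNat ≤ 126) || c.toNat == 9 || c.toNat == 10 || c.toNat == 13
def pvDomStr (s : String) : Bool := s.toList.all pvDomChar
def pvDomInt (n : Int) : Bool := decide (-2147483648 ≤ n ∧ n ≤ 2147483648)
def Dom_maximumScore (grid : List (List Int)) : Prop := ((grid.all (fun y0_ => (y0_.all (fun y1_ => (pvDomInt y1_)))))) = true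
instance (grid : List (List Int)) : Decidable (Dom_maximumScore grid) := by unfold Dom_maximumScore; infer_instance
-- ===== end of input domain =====

-- B replaces A's O(n^2) scan over `prev` inside each DP transition by a prefix-maximum and a
-- backward running-maximum sweep (splitting on whether max(prev,nxt) = nxt or prev): O(n^3) vs O(n^4).

-- ===== PORT A =====
-- Both Pythons fill the per-column prefix-sum row by the recurrence
-- prefixSum[col][r+1] = prefixSum[col][r] + grid[r][col]; ported as this structural recursion.
def pvColPS (grid : List (List Int)) (col : Nat) : Nat → Int
  | 0 => 0
  | r + 1 => pvColPS grid col r + ((grid.getD r []).getD col 0)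

-- A's gainScore(col, prev, curr, nxt).  (In A the final loop passes col = n-1, which for n = 0 is
-- Python's -1 and reads the all-zero spare row of prefixSum; here Nat 0-1 = 0 also yields 0.)
def pvGainA (grid : List (List Int)) (col prev curr nxt : Nat) : Int :=
  let m := max prev nxt
  if m ≤ curr then 0 else pvColPS grid col m - pvColPS grid col curr

-- one middle-column layer of A: the triple loop updating new_dp in place,
-- with the 2-D array represented as a function updated pointwise.
def pvStepA (grid : List (List Int)) (n col : Nat) (dp : Nat → Nat → Int) : Nat → Nat → Int :=
  (List.range (n + 1)).foldl (fun nd prev =>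
    (List.range (n + 1)).foldl (fun nd curr =>
      if dp prev curr = -1 then nd
      else (List.range (n + 1)).foldl (fun nd nxt =>
        fun a b => if a = curr ∧ b = nxt then
            max (nd a b) (dp prev curr + pvGainA grid col prev curr nxt)
          else nd a b) nd) nd)
    (fun _ _ => (-1 : Int))

-- dp after the first column and the loop `for col in range(1, n-1)`
def pvDpA (grid : List (List Int)) (n : Nat) : Nat → Nat → Int :=
  (List.range' 1 (n - 2)).foldl (fun dp col => pvStepA grid n col dp)
    (fun h0 h1 => pvGainA grid 0 0 h0 h1)

def maximumScore (grid : List (List Int)) : Int :=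
  let n := grid.length
  let dp := pvDpA grid n
  (List.range (n + 1)).foldl (fun tot prev =>
    (List.range (n + 1)).foldl (fun tot curr =>
      max tot (dp prev curr + pvGainA grid (n - 1) prev curr 0)) tot) 0

-- ===== PORT B =====
-- B's g(col, curr, m)
def pvG (grid : List (List Int)) (col curr m : Nat) : Int :=
  if m ≤ curr then 0 else pvColPS grid col m - pvColPS grid col curr

-- Python's `b = t if b is None else max(b, t)`
def pvOmax (o : Option Int) (t : Int) : Int := match o with | none => t | some b => max b t

-- f = [dp[p][curr] if dp[p][curr] != -1 else None for p in range(n+1)]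
def pvF (dp : List (List Int)) (n curr : Nat) : List (Option Int) :=
  (List.range (n + 1)).map (fun p =>
    let v := (dp.getD p []).getD curr 0
    if v = -1 then none else some v)

-- the forward sweep building pre (running maximum of the reachable f[p])
def pvPre (f : List (Option Int)) : List (Option Int) :=
  (f.foldl (fun (st : List (Option Int) × Option Int) v =>
    let b := match v with | none => st.2 | some x => some (pvOmax st.2 x)
    (st.1 ++ [b], b)) ([], none)).1

-- the backward sweep over nxt = n..0 producing the row (reversed, then reversed back)
def pvRow (grid : List (List Int)) (n col curr : Nat) (f pre : List (Option Int)) : List Int :=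
  (((List.range (n + 1)).reverse).foldl (fun (st : List Int × Option Int) nxt =>
    let e1 : Int := match pre.getD nxt none with
      | none => -1
      | some pv => max (-1) (pv + pvG grid col curr nxt)
    let e : Int := match st.2 with | none => e1 | some r => max e1 r
    let run : Option Int := match f.getD nxt none with
      | none => st.2
      | some v => some (pvOmax st.2 (v + pvG grid col curr nxt))
    (st.1 ++ [e], run)) ([], none)).1.reverse

def pvStepB (grid : List (List Int)) (n col : Nat) (dp : List (List Int)) : List (List Int) :=
  (List.range (n + 1)).map (fun curr =>
    let f := pvF dp n curr
    pvRow grid n col curr f (pvPre f))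

def pvDpB (grid : List (List Int)) (n : Nat) : List (List Int) :=
  (List.range' 1 (n - 2)).foldl (fun dp col => pvStepB grid n col dp)
    ((List.range (n + 1)).map (fun h0 => (List.range (n + 1)).map (fun h1 => pvG grid 0 h0 h1)))

def maximumScore_alt (grid : List (List Int)) : Int :=
  let n := grid.length
  if n = 0 then 0 else
  let dp := pvDpB grid n
  (List.range (n + 1)).foldl (fun a prev =>
    (List.range (n + 1)).foldl (fun a curr =>
      max a ((dp.getD prev []).getD curr 0 + pvG grid (n - 1) curr prev)) a) 0

-- ===== PRECONDITION & SPEC =====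
-- Python A indexes grid[row][col] for all row, col < len(grid): it raises IndexError exactly when
-- some row is shorter than the grid; Pre_ admits precisely the grids A returns on.
def Pre_maximumScore (grid : List (List Int)) : Prop :=
  ∀ r ∈ grid, grid.length ≤ r.length
instance (grid : List (List Int)) : Decidable (Pre_maximumScore grid) := by
  unfold Pre_maximumScore; infer_instance

def pvWitness_maximumScore : List (List Int) := [[1, -3], [4, 2]]

def Spec_maximumScore (grid : List (List Int)) (out : Int) : Prop := out = maximumScore_alt grid
instance (grid : List (List Int)) (out : Int) : Decidable (Spec_maximumScore grid out) := by
  unfold Spec_maximumScore; infer_instance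

-- ===== CLAIM (what is proved, stated in full; the proofs are below) =====
def Claim_equal_maximumScore : Prop := ∀ (grid : List (List Int)), Dom_maximumScore grid →
  Pre_maximumScore grid → Spec_maximumScore grid (maximumScore grid)

-- ===== LEMMAS AND PROOFS =====

-- option-max accumulation (the shared shape of B's two sweeps)
def pvOstep (o : Option Int) (v : Option Int) : Option Int :=
  match v with | none => o | some x => some (pvOmax o x)

def pvObest (l : List (Option Int)) : Option Int := l.foldl pvOstep none

-- reference value of one A-layer entry: fold over prev of the guarded max
def pvMref (grid : List (List Int)) (col : Nat) (dp : Nat → Nat → Int) (m c x : Nat) : Int :=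
  (List.range m).foldl (fun acc p =>
    if dp p c = -1 then acc else max acc (dp p c + pvG grid col c (max p x))) (-1)

theorem pvGainA_eq (grid : List (List Int)) (col prev curr nxt : Nat) :
    pvGainA grid col prev curr nxt = pvG grid col curr (max prev nxt) := rfl

theorem pvObest_append (l : List (Option Int)) (v : Option Int) :
    pvObest (l ++ [v]) = pvOstep (pvObest l) v := by
  simp [pvObest, List.foldl_append]

theorem pvFoldl_ostep_some (l : List (Option Int)) (b : Int) :
    l.foldl pvOstep (some b) =
      some (match pvObest l with | none => b | some m => max b m) := by
  induction l generalizing b with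
  | nil => simp [pvObest]
  | cons v l ih =>
    cases v with
    | none =>
      have h2 : pvObest (none :: l) = pvObest l := by simp [pvObest, pvOstep]
      simp [List.foldl_cons, pvOstep, h2, ih]
    | some x =>
      have h2 : pvObest (some x :: l) = l.foldl pvOstep (some x) := by
        simp [pvObest, pvOstep, pvOmax]
      rw [List.foldl_cons, h2]
      show l.foldl pvOstep (pvOstep (some b) (some x)) = _
      simp only [pvOstep, pvOmax]
      rw [ih, ih]
      cases hob : pvObest l with
      | none => simp
      | some m => simp [max_assoc]

theorem pvGen (l : List (Option Int)) (a : Int) :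
    l.foldl (fun acc v => match v with | none => acc | some t => max acc t) a =
      match pvObest l with | none => a | some m => max a m := by
  induction l generalizing a with
  | nil => simp [pvObest]
  | cons v l ih =>
    cases v with
    | none =>
      have h2 : pvObest (none :: l) = pvObest l := by simp [pvObest, pvOstep]
      simp [List.foldl_cons, h2, ih]
    | some t =>
      have h2 : pvObest (some t :: l) = l.foldl pvOstep (some t) := by
        simp [pvObest, pvOstep, pvOmax]
      rw [List.foldl_cons, h2, pvFoldl_ostep_some]
      show l.foldl _ (max a t) = _
      rw [ih]
      cases hob : pvObest l with
      | none => simp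
      | some m => simp [max_assoc]

theorem pvObest_cons (v : Option Int) (l : List (Option Int)) :
    pvObest (v :: l) =
      match v with
      | none => pvObest l
      | some x => some (match pvObest l with | none => x | some m => max x m) := by
  cases v with
  | none => simp [pvObest, pvOstep]
  | some x =>
    have h2 : pvObest (some x :: l) = l.foldl pvOstep (some x) := by
      simp [pvObest, pvOstep, pvOmax]
    rw [h2, pvFoldl_ostep_some]

theorem pvObest_reverse (l : List (Option Int)) : pvObest l.reverse = pvObest l := by
  induction l with
  | nil => rfl
  | cons v l ih =>
    rw [List.reverse_cons, pvObest_append, pvObest_cons, ih]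
    cases v with
    | none => rfl
    | some x =>
      cases hob : pvObest l with
      | none => simp [pvOstep, pvOmax]
      | some m => simp [pvOstep, pvOmax, max_comm]

theorem pvObest_map_add (l : List (Option Int)) (t : Int) :
    pvObest (l.map (Option.map (fun v => v + t))) = (pvObest l).map (fun m => m + t) := by
  induction l with
  | nil => rfl
  | cons v l ih =>
    rw [List.map_cons, pvObest_cons, pvObest_cons, ih]
    cases v with
    | none => rfl
    | some x =>
      cases hob : pvObest l with
      | none => rfl
      | some m =>
        simp only [Option.map_some]
        rw [show max x m + t = max (x + t) (m + t) by omega]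

-- folding a guarded max over indices = option-best of the mapped terms
theorem pvGenFold (ps : List Nat) (a : Int) (h : Nat → Option Int) (k : Nat → Int) :
    ps.foldl (fun acc p => match h p with | none => acc | some v => max acc (v + k p)) a =
      match pvObest (ps.map (fun p => (h p).map (fun v => v + k p))) with
      | none => a | some m => max a m := by
  rw [← pvGen (ps.map (fun p => (h p).map (fun v => v + k p))) a, List.foldl_map]
  congr 1
  funext acc p
  cases h p <;> rfl


-- ---------- A-side characterization ----------

theorem pvInnerNxt (curr : Nat) (v : Nat → Int) (m : Nat) (nd : Nat → Nat → Int) (c x : Nat) :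
    ((List.range m).foldl (fun nd nxt =>
        fun a b => if a = curr ∧ b = nxt then max (nd a b) (v nxt) else nd a b) nd) c x
      = if c = curr ∧ x < m then max (nd c x) (v x) else nd c x := by
  induction m generalizing nd with
  | zero => simp
  | succ m ih =>
    rw [List.range_succ, List.foldl_append, List.foldl_cons, List.foldl_nil]
    show (fun a b => if a = curr ∧ b = m then max _ (v m) else _) c x = _
    simp only []
    rw [ih]
    by_cases hc : c = curr
    · subst hc
      by_cases hx : x = m
      · subst hx
        simp
      · have : (x < m + 1) ↔ (x < m) := by omega
        simp [hx, this]
    · simp [hc]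

theorem pvInnerCurr (grid : List (List Int)) (n col : Nat) (dp : Nat → Nat → Int) (prev m : Nat)
    (nd : Nat → Nat → Int) (c x : Nat) (hx : x ≤ n) :
    ((List.range m).foldl (fun nd curr =>
      if dp prev curr = -1 then nd
      else (List.range (n + 1)).foldl (fun nd nxt =>
        fun a b => if a = curr ∧ b = nxt then
            max (nd a b) (dp prev curr + pvGainA grid col prev curr nxt)
          else nd a b) nd) nd) c x
      = if c < m ∧ ¬ dp prev c = -1 then max (nd c x) (dp prev c + pvGainA grid col prev c x)
        else nd c x := by
  induction m generalizing nd with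
  | zero => simp
  | succ m ih =>
    rw [List.range_succ (n := m), List.foldl_append, List.foldl_cons, List.foldl_nil]
    by_cases hd : dp prev m = -1
    · rw [if_pos hd, ih]
      by_cases hc : c = m
      · subst hc; simp [hd]
      · have hiff : (c < m + 1) ↔ (c < m) := by omega
        simp [hiff]
    · rw [if_neg hd, pvInnerNxt, ih]
      by_cases hc : c = m
      · subst hc
        have hxx : x < n + 1 := by omega
        simp [hd, hxx]
      · have hiff : (c < m + 1) ↔ (c < m) := by omega
        simp [hc, hiff]

theorem pvPrevFold (grid : List (List Int)) (n col : Nat) (dp : Nat → Nat → Int) (c x : Nat)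
    (hc : c ≤ n) (hx : x ≤ n) (m : Nat) (nd : Nat → Nat → Int) :
    ((List.range m).foldl (fun nd prev =>
      (List.range (n + 1)).foldl (fun nd curr =>
        if dp prev curr = -1 then nd
        else (List.range (n + 1)).foldl (fun nd nxt =>
          fun a b => if a = curr ∧ b = nxt then
              max (nd a b) (dp prev curr + pvGainA grid col prev curr nxt)
            else nd a b) nd) nd) nd) c x
      = (List.range m).foldl (fun acc p =>
          if dp p c = -1 then acc else max acc (dp p c + pvG grid col c (max p x))) (nd c x) := by
  induction m generalizing nd with
  | zero => simp
  | succ m ih =>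
    rw [List.range_succ (n := m)]
    simp only [List.foldl_append, List.foldl_cons, List.foldl_nil]
    rw [pvInnerCurr grid n col dp m (n + 1) _ c x hx, ih]
    have hgc : c < n + 1 := by omega
    by_cases hd : dp m c = -1
    · simp [hd]
    · simp [hd, hgc, pvGainA_eq]

theorem pvStepA_eq (grid : List (List Int)) (n col : Nat) (dp : Nat → Nat → Int) (c x : Nat)
    (hc : c ≤ n) (hx : x ≤ n) :
    pvStepA grid n col dp c x = pvMref grid col dp (n + 1) c x := by
  unfold pvStepA pvMref
  rw [pvPrevFold grid n col dp c x hc hx (n + 1)]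

-- ---------- B-side characterization ----------

theorem pvPre_snd (f : List (Option Int)) (st : List (Option Int) × Option Int) :
    (f.foldl (fun (st : List (Option Int) × Option Int) v =>
      let b := match v with | none => st.2 | some x => some (pvOmax st.2 x)
      (st.1 ++ [b], b)) st).2 = f.foldl pvOstep st.2 := by
  induction f generalizing st with
  | nil => rfl
  | cons v f ih =>
    rw [List.foldl_cons, List.foldl_cons, ih]
    cases v <;> rfl

theorem pvPre_append (f : List (Option Int)) (v : Option Int) :
    pvPre (f ++ [v]) = pvPre f ++ [pvOstep (pvObest f) v] := by
  unfold pvPre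
  rw [List.foldl_append, List.foldl_cons, List.foldl_nil]
  have h := pvPre_snd f ([], none)
  cases v <;> simp [pvOstep, h, pvObest]

theorem pvPre_length (f : List (Option Int)) : (pvPre f).length = f.length := by
  induction f using List.reverseRecOn with
  | nil => rfl
  | append_singleton f v ih => rw [pvPre_append]; simp [ih]

theorem pvPre_getD (f : List (Option Int)) (i : Nat) (h : i < f.length) :
    (pvPre f).getD i none = pvObest (f.take (i + 1)) := by
  induction f using List.reverseRecOn with
  | nil => simp at h
  | append_singleton f v ih =>
    rw [pvPre_append]
    rcases Nat.lt_or_ge i f.length with hi | hi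
    · rw [List.getD_append _ _ _ _ (by rw [pvPre_length]; exact hi), ih hi]
      congr 1
      rw [List.take_append_of_le_length (by omega)]
    · have hie : i = f.length := by simp [List.length_append] at h; omega
      subst hie
      rw [show (pvPre f ++ [pvOstep (pvObest f) v]).getD f.length none
            = pvOstep (pvObest f) v from by simp [List.getD_eq_getElem?_getD, pvPre_length]]
      rw [List.take_of_length_le (by simp), pvObest_append]

def pvDstep (grid : List (List Int)) (col curr : Nat) (f pre : List (Option Int))
    (st : List Int × Option Int) (nxt : Nat) : List Int × Option Int :=
  let e1 : Int := match pre.getD nxt none with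
    | none => -1
    | some pv => max (-1) (pv + pvG grid col curr nxt)
  let e : Int := match st.2 with | none => e1 | some r => max e1 r
  let run : Option Int := match f.getD nxt none with
    | none => st.2
    | some v => some (pvOmax st.2 (v + pvG grid col curr nxt))
  (st.1 ++ [e], run)

def pvFterm (grid : List (List Int)) (col curr : Nat) (f : List (Option Int)) (p : Nat) :
    Option Int :=
  (f.getD p none).map (fun v => v + pvG grid col curr p)

def pvErow (grid : List (List Int)) (col curr : Nat) (pre : List (Option Int)) (x : Nat)
    (r : Option Int) : Int :=
  let e1 : Int := match pre.getD x none with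
    | none => -1
    | some pv => max (-1) (pv + pvG grid col curr x)
  match r with | none => e1 | some rv => max e1 rv

theorem pvRow_acc (grid : List (List Int)) (col curr : Nat) (f pre : List (Option Int))
    (l : List Nat) (as : List Int) (r : Option Int) :
    l.foldl (pvDstep grid col curr f pre) (as, r)
      = (as ++ (l.foldl (pvDstep grid col curr f pre) ([], r)).1,
         (l.foldl (pvDstep grid col curr f pre) ([], r)).2) := by
  induction l generalizing as r with
  | nil => simp
  | cons nxt l ih =>
    simp only [List.foldl_cons, pvDstep, List.nil_append]
    conv_lhs => rw [ih]
    conv_rhs => rw [ih]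
    simp [List.append_assoc]

theorem pvRow_main (grid : List (List Int)) (col curr : Nat) (f pre : List (Option Int))
    (m : Nat) (r0 : Option Int) :
    ((List.range (m + 1)).reverse.foldl (pvDstep grid col curr f pre) ([], r0)).1.length = m + 1 ∧
    ∀ x, x ≤ m →
      ((((List.range (m + 1)).reverse.foldl (pvDstep grid col curr f pre) ([], r0)).1.reverse).getD x 0
        = pvErow grid col curr pre x
            (((List.range' (x + 1) (m - x)).reverse.map (pvFterm grid col curr f)).foldl pvOstep r0)) := by
  induction m generalizing r0 with
  | zero =>
    constructor
    · simp [pvDstep]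
    · intro x hx
      have hx0 : x = 0 := by omega
      subst hx0
      simp [pvDstep, pvErow]
  | succ m ih =>
    have hrev : (List.range (m + 2)).reverse = (m + 1) :: (List.range (m + 1)).reverse := by
      rw [List.range_succ (n := m + 1)]; simp
    have hstep : pvDstep grid col curr f pre ([], r0) (m + 1)
        = ([pvErow grid col curr pre (m + 1) r0], pvOstep r0 (pvFterm grid col curr f (m + 1))) := by
      cases hfm : f.getD (m + 1) none <;>
        simp only [pvDstep, pvErow, pvOstep, pvFterm, hfm, Option.map_some, Option.map_none,
          List.nil_append]
    rw [hrev, List.foldl_cons, hstep, pvRow_acc]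
    obtain ⟨ihlen, ihget⟩ := ih (pvOstep r0 (pvFterm grid col curr f (m + 1)))
    constructor
    · rw [List.length_append, ihlen, List.length_singleton]; omega
    · intro x hx
      simp only [List.reverse_append, List.reverse_cons, List.reverse_nil, List.nil_append]
      rcases Nat.lt_or_ge x (m + 1) with hxm | hxm
      · rw [List.getD_append _ _ _ _ (by rw [List.length_reverse, ihlen]; omega)]
        rw [ihget x (by omega)]
        have hsplit : List.range' (x + 1) (m + 1 - x) = List.range' (x + 1) (m - x) ++ [m + 1] := by
          rw [show m + 1 - x = (m - x) + 1 from by omega, List.range'_1_concat,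
            show x + 1 + (m - x) = m + 1 from by omega]
        rw [hsplit]
        simp
      · have hxe : x = m + 1 := by omega
        subst hxe
        have hlen : ((List.range (m + 1)).reverse.foldl (pvDstep grid col curr f pre)
            ([], pvOstep r0 (pvFterm grid col curr f (m + 1)))).1.reverse.length = m + 1 := by
          rw [List.length_reverse, ihlen]
        rw [List.getD_append_right _ _ _ _ (by rw [hlen]), hlen,
          show m + 1 - (m + 1) = 0 from by omega, show List.range' (m + 2) 0 = [] from rfl]
        rfl

-- ---------- the layer equivalence and the column induction ----------

theorem pvLayer (grid : List (List Int)) (n col : Nat) (dp : Nat → Nat → Int)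
    (dpL : List (List Int))
    (HP : ∀ p c, p ≤ n → c ≤ n → dp p c = (dpL.getD p []).getD c 0) :
    ∀ p c, p ≤ n → c ≤ n →
      pvStepA grid n col dp p c = ((pvStepB grid n col dpL).getD p []).getD c 0 := by
  intro p c hp hc
  have hfp : ∀ q, q ≤ n → (pvF dpL n p).getD q none
      = (if dp q p = -1 then none else some (dp q p)) := by
    intro q hq
    unfold pvF
    rw [PySem.List.getD_map_range _ _ _ _ (by omega)]
    simp only []
    rw [← HP q p hq hp]
  have hlenf : (pvF dpL n p).length = n + 1 := by simp [pvF]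
  have hstepB : (pvStepB grid n col dpL).getD p []
      = pvRow grid n col p (pvF dpL n p) (pvPre (pvF dpL n p)) := by
    unfold pvStepB
    rw [PySem.List.getD_map_range _ _ _ _ (by omega)]
  rw [hstepB]
  have hrow : pvRow grid n col p (pvF dpL n p) (pvPre (pvF dpL n p))
      = ((List.range (n + 1)).reverse.foldl
          (pvDstep grid col p (pvF dpL n p) (pvPre (pvF dpL n p))) ([], none)).1.reverse := rfl
  rw [hrow]
  obtain ⟨-, hget⟩ := pvRow_main grid col p (pvF dpL n p) (pvPre (pvF dpL n p)) n none
  rw [hget c hc]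
  rw [pvStepA_eq grid n col dp p c hp hc]
  -- characterize the run argument
  have hmr : (List.range' (c + 1) (n - c)).reverse.map (pvFterm grid col p (pvF dpL n p))
      = ((List.range' (c + 1) (n - c)).map (fun q =>
          (if dp q p = -1 then none else some (dp q p)).map (fun v => v + pvG grid col p q))).reverse := by
    rw [← List.map_reverse]
    apply List.map_congr_left
    intro q hq
    have hqn : q ≤ n := by
      have := List.mem_range'_1.mp (List.mem_reverse.mp hq); omega
    unfold pvFterm
    rw [hfp q hqn]
  have hrun : ((List.range' (c + 1) (n - c)).reverse.map
        (pvFterm grid col p (pvF dpL n p))).foldl pvOstep none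
      = pvObest ((List.range' (c + 1) (n - c)).map (fun q =>
          (if dp q p = -1 then none else some (dp q p)).map (fun v => v + pvG grid col p q))) := by
    rw [hmr]
    exact pvObest_reverse _
  -- characterize the pre argument
  have hpre : (pvPre (pvF dpL n p)).getD c none
      = pvObest ((List.range (c + 1)).map (fun q => if dp q p = -1 then none else some (dp q p))) := by
    rw [pvPre_getD _ _ (by rw [hlenf]; omega)]
    congr 1
    unfold pvF
    rw [← List.map_take, List.take_range, show min (c + 1) (n + 1) = c + 1 from by omega]
    apply List.map_congr_left
    intro q hq
    have hq' : q ≤ n := by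
      have := List.mem_range.mp hq; omega
    simp only []
    rw [← HP q p hq' hp]
  -- A side: rewrite to the guarded-match form and split the range at c
  unfold pvMref
  have hbody : (fun (acc : Int) q => if dp q p = -1 then acc
        else max acc (dp q p + pvG grid col p (max q c)))
      = (fun acc q => match (if dp q p = -1 then none else some (dp q p)) with
          | none => acc | some v => max acc (v + pvG grid col p (max q c))) := by
    funext acc q; by_cases hd : dp q p = -1 <;> simp [hd]
  rw [hbody]
  have hsp : List.range (n + 1) = List.range (c + 1) ++ List.range' (c + 1) (n - c) := by
    rw [List.range_eq_range', List.range_eq_range',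
      show n + 1 = (c + 1) + (n - c) from by omega, ← List.range'_append_1]
    simp
  rw [hsp, List.foldl_append]
  have hpart1 : (List.range (c + 1)).foldl (fun acc q =>
        match (if dp q p = -1 then none else some (dp q p)) with
        | none => acc | some v => max acc (v + pvG grid col p (max q c))) (-1)
      = match ((pvPre (pvF dpL n p)).getD c none).map (fun v => v + pvG grid col p c) with
        | none => -1 | some m => max (-1) m := by
    rw [PySem.List.foldl_congr_mem (List.range (c + 1)) _ (fun acc q =>
        match (if dp q p = -1 then none else some (dp q p)) with
        | none => acc | some v => max acc (v + pvG grid col p c)) (-1) ?_]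
    · rw [pvGenFold (List.range (c + 1)) (-1)
          (fun q => if dp q p = -1 then none else some (dp q p)) (fun _ => pvG grid col p c)]
      rw [hpre]
      rw [show (List.range (c + 1)).map (fun q =>
            (if dp q p = -1 then none else some (dp q p)).map (fun v => v + pvG grid col p c))
          = ((List.range (c + 1)).map (fun q =>
              if dp q p = -1 then none else some (dp q p))).map
                (Option.map (fun v => v + pvG grid col p c)) from by
        rw [List.map_map]; rfl]
      rw [pvObest_map_add]
    · intro acc q hq
      have : max q c = c := by
        have := List.mem_range.mp hq; omega
      rw [this]
  rw [hpart1]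
  have hpart2 : ∀ (a : Int), (List.range' (c + 1) (n - c)).foldl (fun acc q =>
        match (if dp q p = -1 then none else some (dp q p)) with
        | none => acc | some v => max acc (v + pvG grid col p (max q c))) a
      = match pvObest ((List.range' (c + 1) (n - c)).map (fun q =>
          (if dp q p = -1 then none else some (dp q p)).map (fun v => v + pvG grid col p q))) with
        | none => a | some m => max a m := by
    intro a
    rw [PySem.List.foldl_congr_mem (List.range' (c + 1) (n - c)) _ (fun acc q =>
        match (if dp q p = -1 then none else some (dp q p)) with
        | none => acc | some v => max acc (v + pvG grid col p q)) a ?_]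
    · exact pvGenFold (List.range' (c + 1) (n - c)) a
        (fun q => if dp q p = -1 then none else some (dp q p)) (fun q => pvG grid col p q)
    · intro acc q hq
      have : max q c = q := by
        have := List.mem_range'_1.mp hq; omega
      rw [this]
  rw [hpart2]
  unfold pvErow
  rw [hrun]
  cases hob1 : (pvPre (pvF dpL n p)).getD c none <;>
    cases hob2 : pvObest ((List.range' (c + 1) (n - c)).map (fun q =>
        (if dp q p = -1 then none else some (dp q p)).map (fun v => v + pvG grid col p q))) <;>
    simp

theorem pvCols (grid : List (List Int)) (n : Nat) (l : List Nat) :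
    ∀ (dp : Nat → Nat → Int) (dpL : List (List Int)),
      (∀ p c, p ≤ n → c ≤ n → dp p c = (dpL.getD p []).getD c 0) →
      ∀ p c, p ≤ n → c ≤ n →
        (l.foldl (fun dp col => pvStepA grid n col dp) dp) p c
          = ((l.foldl (fun d col => pvStepB grid n col d) dpL).getD p []).getD c 0 := by
  induction l with
  | nil => intro dp dpL HP p c hp hc; exact HP p c hp hc
  | cons a l ih =>
    intro dp dpL HP p c hp hc
    rw [List.foldl_cons, List.foldl_cons]
    exact ih _ _ (pvLayer grid n a dp dpL HP) p c hp hc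

-- ===== VERDICT (by name: the statement is the Claim_ definition above) =====
theorem maximumScore_spec : Claim_equal_maximumScore := by
  unfold Claim_equal_maximumScore Spec_maximumScore
  intro grid _ _
  by_cases h0 : grid.length = 0
  · have hnil : grid = [] := List.length_eq_zero_iff.mp h0
    subst hnil
    decide
  · unfold maximumScore maximumScore_alt
    simp only [if_neg h0]
    have hinit : ∀ p c, p ≤ grid.length → c ≤ grid.length →
        pvGainA grid 0 0 p c
          = (((List.range (grid.length + 1)).map (fun h0 =>
              (List.range (grid.length + 1)).map (fun h1 => pvG grid 0 h0 h1))).getD p []).getD c 0 := by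
      intro p c hp hc
      rw [PySem.List.getD_map_range _ _ _ _ (by omega),
        PySem.List.getD_map_range _ _ _ _ (by omega)]
      simp [pvGainA, pvG]
    have hdp : ∀ p c, p ≤ grid.length → c ≤ grid.length →
        pvDpA grid grid.length p c
          = ((pvDpB grid grid.length).getD p []).getD c 0 := by
      intro p c hp hc
      exact pvCols grid grid.length (List.range' 1 (grid.length - 2)) _ _ hinit p c hp hc
    apply PySem.List.foldl_congr_mem
    intro acc prev hprev
    apply PySem.List.foldl_congr_mem
    intro acc2 curr hcurr
    have hp : prev ≤ grid.length := by
      have := List.mem_range.mp hprev; omega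
    have hc : curr ≤ grid.length := by
      have := List.mem_range.mp hcurr; omega
    rw [hdp prev curr hp hc]
    have hg : pvGainA grid (grid.length - 1) prev curr 0
        = pvG grid (grid.length - 1) curr prev := by
      simp [pvGainA, pvG]
    rw [hg]
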